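-- pv_equiv track=rewrite | github.com/mdsofiullah6/Python | project/perfect project/diffrenciat/get difference between tow strign.py | get_difference_indices
-- ===== SOURCE A (Python) =====
-- def get_difference_indices(str1, str2):
--     # Initialize a list to store the indices of the different characters
--     difference_indices = []
--
--     # Compare each character in the strings and add the index to the list if they are different
--     for i in range(min(len(str1), len(str2))):
--         if str1[i] != str2[i]:
--             difference_indices.append(i)
--
--     # Add the indices of any extra characters in the longer string
--     for i in range(min(len(str1), len(str2)), max(len(str1), len(str2))):
--         difference_indices.append(i)
--
--     return difference_indices
-- ===== SOURCE B (Python) =====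
-- def get_difference_indices(str1, str2):
--     # Complement approach: record the set of positions where the strings AGREE
--     # (only positions within both strings can agree), then the answer is every
--     # index of the padded range that is not in that set.
--     equal = {i for i, (a, b) in enumerate(zip(str1, str2)) if a == b}
--     return [i for i in range(max(len(str1), len(str2))) if i not in equal]
-- ===== Notes on version B (the rewrite author's own statement) =====
-- stated objective: alternative
-- what changed: Instead of scanning for mismatches and then appending the tail indices (A's two staged loops), B builds a hash set of the positions where the two strings AGREE (from enumerate(zip(...))) and returns the complement of that set within range(max(len1,len2)).
import Mathlib
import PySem

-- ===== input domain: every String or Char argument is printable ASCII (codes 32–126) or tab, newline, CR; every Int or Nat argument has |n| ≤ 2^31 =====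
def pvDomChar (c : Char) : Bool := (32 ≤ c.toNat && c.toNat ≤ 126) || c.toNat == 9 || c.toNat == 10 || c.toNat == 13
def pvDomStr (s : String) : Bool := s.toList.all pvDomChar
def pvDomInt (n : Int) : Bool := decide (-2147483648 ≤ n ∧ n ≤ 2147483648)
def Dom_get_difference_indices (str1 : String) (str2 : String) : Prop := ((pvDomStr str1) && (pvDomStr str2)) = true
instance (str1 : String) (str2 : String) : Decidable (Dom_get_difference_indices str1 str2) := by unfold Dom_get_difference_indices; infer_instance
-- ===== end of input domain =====

-- B replaces A's two staged mismatch/tail loops by a set of agreeing positions and its complement within the padded range (alternative algorithm, same values).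
-- ===== PORT A =====
def get_difference_indices (str1 : String) (str2 : String) : List Int :=
  let l1 := str1.toList
  let l2 := str2.toList
  -- first loop: for i in range(min(len(str1), len(str2))): if str1[i] != str2[i]: append i
  let difference_indices :=
    (PySem.List.pyRange 0 (min (l1.length : Int) (l2.length : Int)) 1).foldl
      (fun acc i =>
        if PySem.List.pyGetD l1 i ' ' ≠ PySem.List.pyGetD l2 i ' ' then acc ++ [i] else acc) []
  -- second loop: for i in range(min, max): append i
  (PySem.List.pyRange (min (l1.length : Int) (l2.length : Int))
      (max (l1.length : Int) (l2.length : Int)) 1).foldl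
    (fun acc i => acc ++ [i]) difference_indices

-- ===== PORT B =====
def get_difference_indices_alt (str1 : String) (str2 : String) : List Int :=
  let l1 := str1.toList
  let l2 := str2.toList
  -- equal = {i for i, (a, b) in enumerate(zip(str1, str2)) if a == b}
  let equal : PySem.Set Int :=
    PySem.Set.ofList
      (((PySem.List.enumerate (l1.zip l2) 0).filter (fun p => p.2.1 == p.2.2)).map (fun p => p.1))
  -- [i for i in range(max(len(str1), len(str2))) if i not in equal]
  (PySem.List.pyRange 0 (max (l1.length : Int) (l2.length : Int)) 1).filter
    (fun i => !(PySem.Set.contains equal i))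

-- ===== PRECONDITION & SPEC =====
def Spec_get_difference_indices (str1 : String) (str2 : String) (out : List Int) : Prop := out = get_difference_indices_alt str1 str2
instance (str1 : String) (str2 : String) (out : List Int) : Decidable (Spec_get_difference_indices str1 str2 out) := by unfold Spec_get_difference_indices; infer_instance

-- ===== CLAIM (what is proved, stated in full; the proofs are below) =====
def Claim_equal_get_difference_indices : Prop := ∀ (str1 : String) (str2 : String), Dom_get_difference_indices str1 str2 → Spec_get_difference_indices str1 str2 (get_difference_indices str1 str2)

-- ===== LEMMAS AND PROOFS =====

-- membership in B's set of agreeing positions, characterised by index bounds and character equality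
lemma mem_equal_set_iff (l1 l2 : List Char) (i : Int) :
    (i ∈ PySem.Set.ofList
      (((PySem.List.enumerate (l1.zip l2) 0).filter (fun p => p.2.1 == p.2.2)).map (fun p => p.1)))
    ↔ (0 ≤ i ∧ i < min (l1.length : Int) (l2.length : Int) ∧
        PySem.List.pyGetD l1 i ' ' = PySem.List.pyGetD l2 i ' ') := by
  simp only [PySem.Set.mem_ofList, List.mem_map, List.mem_filter,
    PySem.List.mem_enumerate_iff]
  constructor
  · rintro ⟨p, ⟨⟨k, hk, rfl⟩, heq⟩, rfl⟩
    simp only [List.length_zip] at hk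
    simp only [List.getElem_zip, beq_iff_eq] at heq
    have hk1 : k < l1.length := lt_of_lt_of_le hk (min_le_left _ _)
    have hk2 : k < l2.length := lt_of_lt_of_le hk (min_le_right _ _)
    refine ⟨by omega, lt_min (by omega) (by omega), ?_⟩
    have e1 : PySem.List.pyGetD l1 ((0 : Int) + k) ' ' = l1[k] := by
      rw [PySem.List.pyGetD_eq_getElem (i := (0 : Int) + k) l1 ' ' (by omega) (by omega)]
      simp
    have e2 : PySem.List.pyGetD l2 ((0 : Int) + k) ' ' = l2[k] := by
      rw [PySem.List.pyGetD_eq_getElem (i := (0 : Int) + k) l2 ' ' (by omega) (by omega)]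
      simp
    rw [e1, e2]; exact heq
  · rintro ⟨h0, hlt, heq⟩
    have ha : i < (l1.length : Int) := lt_of_lt_of_le hlt (min_le_left _ _)
    have hb : i < (l2.length : Int) := lt_of_lt_of_le hlt (min_le_right _ _)
    have hk : i.toNat < (l1.zip l2).length := by simp only [List.length_zip]; omega
    refine ⟨((0 : Int) + i.toNat, (l1.zip l2)[i.toNat]), ⟨⟨i.toNat, hk, rfl⟩, ?_⟩, by omega⟩
    have e1 : l1[i.toNat] = PySem.List.pyGetD l1 i ' ' := by
      rw [PySem.List.pyGetD_eq_getElem (i := i) l1 ' ' h0 (by omega)]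
    have e2 : l2[i.toNat] = PySem.List.pyGetD l2 i ' ' := by
      rw [PySem.List.pyGetD_eq_getElem (i := i) l2 ' ' h0 (by omega)]
    simp only [List.getElem_zip, e1, e2, heq, beq_self_eq_true]

-- the same fact on Bool `contains`
lemma contains_equal_set (l1 l2 : List Char) (i : Int) :
    ((PySem.Set.ofList
      (((PySem.List.enumerate (l1.zip l2) 0).filter (fun p => p.2.1 == p.2.2)).map (fun p => p.1))).contains i = true)
    ↔ (0 ≤ i ∧ i < min (l1.length : Int) (l2.length : Int) ∧
        PySem.List.pyGetD l1 i ' ' = PySem.List.pyGetD l2 i ' ') := by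
  rw [PySem.Set.contains_iff, mem_equal_set_iff]

-- ===== VERDICT (by name: the statement is the Claim_ definition above) =====
theorem get_difference_indices_spec : Claim_equal_get_difference_indices := by
  intro str1 str2 _
  unfold Spec_get_difference_indices get_difference_indices get_difference_indices_alt
  dsimp only
  set l1 := str1.toList
  set l2 := str2.toList
  set m : Int := min (l1.length : Int) (l2.length : Int) with hm
  set M : Int := max (l1.length : Int) (l2.length : Int) with hM
  have hmM : m ≤ M := min_le_of_left_le (le_max_left _ _)
  have hsplit := PySem.List.pyRange_one_append 0 m M
    (le_min (by positivity) (by positivity)) hmM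
  rw [PySem.List.foldl_append_ite_eq_filter, PySem.List.foldl_append_singleton_eq_self,
      hsplit, List.filter_append, List.nil_append]
  have h1 : List.filter
      (fun i => !(PySem.Set.ofList
          (((PySem.List.enumerate (l1.zip l2) 0).filter (fun p => p.2.1 == p.2.2)).map
            (fun p => p.1))).contains i)
      (PySem.List.pyRange 0 m 1)
      = List.filter (fun x => decide (PySem.List.pyGetD l1 x ' ' ≠ PySem.List.pyGetD l2 x ' '))
        (PySem.List.pyRange 0 m 1) := by
    apply List.filter_congr
    intro i hi
    have hi' := (PySem.List.mem_pyRange_one).1 hi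
    have hc := contains_equal_set l1 l2 i
    by_cases he : PySem.List.pyGetD l1 i ' ' = PySem.List.pyGetD l2 i ' '
    · have ht : (PySem.Set.ofList
          (((PySem.List.enumerate (l1.zip l2) 0).filter (fun p => p.2.1 == p.2.2)).map
            (fun p => p.1))).contains i = true := hc.mpr ⟨hi'.1, hi'.2, he⟩
      rw [ht]
      simp [he]
    · have hf : (PySem.Set.ofList
          (((PySem.List.enumerate (l1.zip l2) 0).filter (fun p => p.2.1 == p.2.2)).map
            (fun p => p.1))).contains i = false :=
        Bool.eq_false_iff.mpr (fun h => he (hc.mp h).2.2)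
      rw [hf]
      simp [he]
  have h2 : List.filter
      (fun i => !(PySem.Set.ofList
          (((PySem.List.enumerate (l1.zip l2) 0).filter (fun p => p.2.1 == p.2.2)).map
            (fun p => p.1))).contains i)
      (PySem.List.pyRange m M 1)
      = PySem.List.pyRange m M 1 := by
    rw [List.filter_eq_self]
    intro i hi
    have hi' := (PySem.List.mem_pyRange_one).1 hi
    have hf : (PySem.Set.ofList
        (((PySem.List.enumerate (l1.zip l2) 0).filter (fun p => p.2.1 == p.2.2)).map
          (fun p => p.1))).contains i = false :=
      Bool.eq_false_iff.mpr (fun h => by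
        have := (contains_equal_set l1 l2 i).mp h
        omega)
    rw [hf]
    rfl
  rw [h1, h2]
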